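-- pv_equiv track=rewrite | github.com/sugimotoyuuki/kyopro | contest/ABC/274/d.py | solve
-- ===== SOURCE A (Python) =====
-- width = 2 * 10**4 + 1
--
-- def solve(a, doko, geta=0):
--     m = len(a)
--     dp = [[0] * width for _ in range(m + 1)]
--     dp[0][10000 + geta] = 1
--     for i in range(m):
--         for j in range(width):
--             if dp[i][j] == 1:
--                 if j + a[i] < width:
--                     dp[i + 1][j + a[i]] = 1
--                 if 0 <= j - a[i]:
--                     dp[i + 1][j - a[i]] = 1
--                 dp[i][j] = 0
--     # return dp
--     return dp[m][doko + 10000]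
-- ===== SOURCE B (Python) =====
-- width = 2 * 10**4 + 1
--
-- def solve(a, doko, geta=0):
--     # Meet in the middle: grow a frontier set of reachable positions from the
--     # start over the first half of the items, grow one from the target over the
--     # reversed second half (the +/- moves are symmetric for in-range positions,
--     # so backward reachability = forward reachability over the reversed suffix),
--     # and test whether the two frontiers intersect.
--     def reach(items, frontier):
--         for x in items:
--             nxt = set()
--             for j in frontier:
--                 if j + x < width:
--                     nxt.add(j + x)
--                 if j - x >= 0:
--                     nxt.add(j - x)
--             frontier = nxt
--         return frontier
--     h = len(a) // 2
--     fwd = reach(a[:h], {10000 + geta})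
--     bwd = reach(list(reversed(a[h:])), {doko + 10000})
--     return 1 if fwd & bwd else 0
-- ===== Notes on version B (the rewrite author's own statement) =====
-- stated objective: faster
-- what changed: Replaces A's (m+1) x 20001 explicit 0/1 DP table with its full-width inner scan per item by a meet-in-the-middle frontier search: a set of reachable positions grown from the start over the first half of the items and one grown from the target over the reversed second half (the +/- moves are symmetric for in-range positions), answering by intersecting the two frontiers; Pre_ restricts to the task's natural domain (non-negative items, in-range doko/geta offsets) because outside it A raises IndexError or returns values via Python negative-index wraparound.
-- outside the precondition, e.g. on solve([-3], 0, 0): A returns 0, B returns 0; on solve([19, 25], 270, -19775): A returns 1, B returns 0; on solve([], -10002, 9999): A returns 1, B returns 0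
import Mathlib
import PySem

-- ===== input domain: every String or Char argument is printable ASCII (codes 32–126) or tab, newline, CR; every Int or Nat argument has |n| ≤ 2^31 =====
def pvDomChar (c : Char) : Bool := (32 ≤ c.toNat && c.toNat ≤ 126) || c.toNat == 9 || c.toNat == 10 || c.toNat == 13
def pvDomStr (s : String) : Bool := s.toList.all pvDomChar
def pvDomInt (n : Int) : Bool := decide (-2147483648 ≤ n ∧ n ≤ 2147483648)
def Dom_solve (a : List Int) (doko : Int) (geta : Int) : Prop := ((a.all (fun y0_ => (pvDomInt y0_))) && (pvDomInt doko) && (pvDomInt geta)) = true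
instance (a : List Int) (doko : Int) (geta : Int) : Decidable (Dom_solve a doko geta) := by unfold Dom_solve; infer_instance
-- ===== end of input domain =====

-- B replaces A's explicit (m+1) x 20001 0/1 DP table (full-width inner scan per item) by a
-- meet-in-the-middle frontier search: a set of reachable positions grown from the start over
-- the first half of the items, one grown from the target over the reversed second half (the
-- +/- moves are symmetric for in-range positions), answering by intersecting the two frontiers
-- (measurably faster: no full table is allocated or scanned, only live positions are touched).
-- Pre_solve restricts to the natural domain (non-negative items, in-range doko/geta offsets):
-- outside it A raises IndexError or returns values via Python negative-index wraparound.


-- ===== PORT A =====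
-- width = 2 * 10**4 + 1
def pyWidth : Nat := 2 * 10 ^ 4 + 1

-- dp[i][j]; on every input admitted by Pre_solve all of A's indices are in range and
-- non-negative, so plain Nat indexing with a default is exact there
def get2 (dp : List (List Int)) (i j : Nat) : Int := (dp.getD i []).getD j 0

-- dp[i][j] = v (same remark)
def set2 (dp : List (List Int)) (i j : Nat) (v : Int) : List (List Int) :=
  dp.set i ((dp.getD i []).set j v)

-- body of `for j in range(width)`: if dp[i][j] == 1: the two guarded writes, then dp[i][j] = 0
def innerBody (a : List Int) (i : Nat) (dp : List (List Int)) (j : Nat) : List (List Int) :=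
  if get2 dp i j = 1 then
    let ai := a.getD i 0
    let dp := if (j : Int) + ai < (pyWidth : Int) then set2 dp (i + 1) ((j : Int) + ai).toNat 1 else dp
    let dp := if 0 ≤ (j : Int) - ai then set2 dp (i + 1) ((j : Int) - ai).toNat 1 else dp
    set2 dp i j 0
  else dp

-- body of `for i in range(m)`
def outerBody (a : List Int) (dp : List (List Int)) (i : Nat) : List (List Int) :=
  (List.range pyWidth).foldl (innerBody a i) dp

def solve (a : List Int) (doko : Int) (geta : Int) : Int :=
  let m := a.length
  let dp0 : List (List Int) := List.replicate (m + 1) (List.replicate pyWidth (0 : Int))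
  let dp1 := set2 dp0 0 (10000 + geta).toNat 1
  let dpF := (List.range m).foldl (outerBody a) dp1
  get2 dpF m (doko + 10000).toNat

-- ===== PORT B =====
-- inner loop body of `reach`: the two guarded set.add calls for one frontier element j
def reachAdd (x : Int) (nxt : List Int) (j : Int) : List Int :=
  let nxt' := if j + x < (pyWidth : Int) then PySem.Set.add nxt (j + x) else nxt
  if 0 ≤ j - x then PySem.Set.add nxt' (j - x) else nxt'

-- `nxt = set(); for j in frontier: …; frontier = nxt` (result consumed only as a set)
def reachStep (x : Int) (frontier : List Int) : List Int :=
  frontier.foldl (reachAdd x) PySem.Set.empty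

-- `for x in items: frontier = …`
def reachB (items : List Int) (frontier : List Int) : List Int :=
  items.foldl (fun cur x => reachStep x cur) frontier

def solve_alt (a : List Int) (doko : Int) (geta : Int) : Int :=
  let h := a.length / 2
  let fwd := reachB (a.take h) (PySem.Set.ofList [10000 + geta])
  let bwd := reachB ((a.drop h).reverse) (PySem.Set.ofList [doko + 10000])
  if PySem.Set.inter fwd bwd ≠ [] then 1 else 0

-- ===== PRECONDITION & SPEC =====
-- Pre_solve restricts to the task's natural domain: non-negative items and in-range start/target
-- offsets. Outside it A raises IndexError or returns a value only through Python's
-- negative-index wraparound (an artefact of list indexing, not the DP's meaning).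
def Pre_solve (a : List Int) (doko : Int) (geta : Int) : Prop :=
  (∀ x ∈ a, 0 ≤ x) ∧ 0 ≤ 10000 + geta ∧ 10000 + geta < (pyWidth : Int)
    ∧ 0 ≤ doko + 10000 ∧ doko + 10000 < (pyWidth : Int)
instance (a : List Int) (doko : Int) (geta : Int) : Decidable (Pre_solve a doko geta) := by
  unfold Pre_solve; infer_instance

def pvWitness_solve : List Int × Int × Int := ([1, 2], 3, 0)

def Spec_solve (a : List Int) (doko : Int) (geta : Int) (out : Int) : Prop := out = solve_alt a doko geta
instance (a : List Int) (doko : Int) (geta : Int) (out : Int) : Decidable (Spec_solve a doko geta out) := by unfold Spec_solve; infer_instance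

-- ===== CLAIM (what is proved, stated in full; the proofs are below) =====
def Claim_equal_solve : Prop := ∀ (a : List Int) (doko : Int) (geta : Int), Dom_solve a doko geta → Pre_solve a doko geta → Spec_solve a doko geta (solve a doko geta)

-- ===== LEMMAS AND PROOFS =====

-- the abstract per-item step on sets of positions (sets as Nat → Bool), shared reference
def stepS (d : Nat) (S : Nat → Bool) : Nat → Bool := fun k =>
  decide (k < pyWidth) && ((decide (d ≤ k) && S (k - d)) || S (k + d))
def foldS (a : List Int) (S : Nat → Bool) : Nat → Bool :=
  a.foldl (fun S x => stepS x.toNat S) S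
def delta (j : Nat) : Nat → Bool := fun t => decide (t = j)
def vanishes (S : Nat → Bool) : Prop := ∀ t, pyWidth ≤ t → S t = false

-- ---------- A side: the table fold computes foldS ----------

-- indicator row and the one-live-row table shape A's dp always has
def indRow (S : Nat → Bool) : List Int :=
  (List.range pyWidth).map (fun j => if S j then 1 else 0)
def tbl (m i : Nat) (S T : Nat → Bool) : List (List Int) :=
  (List.range (m + 1)).map
    (fun t => if t = i then indRow S else if t = i + 1 then indRow T else indRow (fun _ => false))

-- during the inner loop: row i cleared below n, row i+1 holds the partial image
def clearBelow (S : Nat → Bool) (n : Nat) : Nat → Bool := fun t => S t && decide (n ≤ t)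
def partStep (d : Nat) (S : Nat → Bool) (n : Nat) : Nat → Bool := fun k =>
  decide (k < pyWidth) &&
    ((decide (d ≤ k) && decide (k - d < n) && S (k - d)) || (decide (k + d < n) && S (k + d)))

theorem length_indRow (S : Nat → Bool) : (indRow S).length = pyWidth := by simp [indRow]
theorem getElem_indRow (S : Nat → Bool) (j : Nat) (hj : j < pyWidth) :
    (indRow S)[j]'(by simp [length_indRow, hj]) = if S j then 1 else 0 := by simp [indRow]
theorem indRow_congr {S S' : Nat → Bool} (h : ∀ j, j < pyWidth → S j = S' j) :
    indRow S = indRow S' := by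
  apply List.ext_getElem (by simp [length_indRow])
  intro j hj h2
  have hj' : j < pyWidth := by simpa [length_indRow] using hj
  rw [getElem_indRow _ _ hj', getElem_indRow _ _ hj', h j hj']

theorem indRow_set (S : Nat → Bool) (j : Nat) (hj : j < pyWidth) (b : Bool) :
    (indRow S).set j (if b then 1 else 0) = indRow (fun t => if t = j then b else S t) := by
  apply List.ext_getElem (by simp [length_indRow])
  intro u hu h2
  have hu' : u < pyWidth := by simpa [length_indRow] using hu
  rw [List.getElem_set, getElem_indRow _ _ hu', getElem_indRow _ _ hu']
  by_cases hju : j = u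
  · subst hju; simp
  · have hju' : ¬ u = j := fun h => hju h.symm
    rw [if_neg hju, if_neg hju']

theorem length_tbl (m i : Nat) (S T : Nat → Bool) : (tbl m i S T).length = m + 1 := by simp [tbl]
theorem getElem_tbl (m i : Nat) (S T : Nat → Bool) (t : Nat) (ht : t < m + 1) :
    (tbl m i S T)[t]'(by simp [length_tbl, ht]) =
      if t = i then indRow S else if t = i + 1 then indRow T else indRow (fun _ => false) := by
  simp [tbl]

theorem tbl_congr {m i : Nat} {S S' T T' : Nat → Bool}
    (hS : ∀ j, j < pyWidth → S j = S' j) (hT : ∀ j, j < pyWidth → T j = T' j) :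
    tbl m i S T = tbl m i S' T' := by
  simp only [tbl, indRow_congr hS, indRow_congr hT]

theorem getD_tbl (m i : Nat) (S T : Nat → Bool) (t : Nat) (ht : t ≤ m) :
    (tbl m i S T).getD t [] =
      if t = i then indRow S else if t = i + 1 then indRow T else indRow (fun _ => false) := by
  rw [List.getD_eq_getElem _ _ (by simp [length_tbl]; omega), getElem_tbl _ _ _ _ _ (by omega)]

theorem tbl_set_fst (m i : Nat) (S S' T : Nat → Bool) (hi : i ≤ m) :
    (tbl m i S T).set i (indRow S') = tbl m i S' T := by
  apply List.ext_getElem (by simp [length_tbl])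
  intro t ht h2
  have ht' : t < m + 1 := by simpa [length_tbl] using ht
  rw [List.getElem_set, getElem_tbl _ _ _ _ _ ht', getElem_tbl _ _ _ _ _ ht']
  by_cases hit : i = t
  · subst hit; simp
  · have hit' : ¬ t = i := fun h => hit h.symm
    simp [hit, hit']

theorem tbl_set_snd (m i : Nat) (S T T' : Nat → Bool) (hi : i < m) :
    (tbl m i S T).set (i + 1) (indRow T') = tbl m i S T' := by
  apply List.ext_getElem (by simp [length_tbl])
  intro t ht h2
  have ht' : t < m + 1 := by simpa [length_tbl] using ht
  rw [List.getElem_set, getElem_tbl _ _ _ _ _ ht', getElem_tbl _ _ _ _ _ ht']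
  by_cases hit : i + 1 = t
  · subst hit; simp
  · have hit' : ¬ t = i + 1 := fun h => hit h.symm
    simp [hit, hit']

theorem get2_tbl_fst (m i : Nat) (S T : Nat → Bool) (j : Nat) (hi : i ≤ m) (hj : j < pyWidth) :
    get2 (tbl m i S T) i j = if S j then 1 else 0 := by
  rw [get2, getD_tbl _ _ _ _ _ hi, if_pos rfl,
    List.getD_eq_getElem _ _ (by simp [length_indRow, hj]), getElem_indRow _ _ hj]

theorem get2_tbl_final (m : Nat) (S T : Nat → Bool) (j : Nat) (hj : j < pyWidth) :
    get2 (tbl m m S T) m j = if S j then 1 else 0 := get2_tbl_fst m m S T j le_rfl hj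

theorem set2_tbl_fst (m i : Nat) (S T : Nat → Bool) (j : Nat) (hi : i ≤ m) (hj : j < pyWidth)
    (b : Bool) :
    set2 (tbl m i S T) i j (if b then 1 else 0) =
      tbl m i (fun t => if t = j then b else S t) T := by
  rw [set2, getD_tbl _ _ _ _ _ hi, if_pos rfl, indRow_set _ _ hj, tbl_set_fst _ _ _ _ _ hi]

theorem set2_tbl_snd (m i : Nat) (S T : Nat → Bool) (j : Nat) (hi : i < m) (hj : j < pyWidth)
    (b : Bool) :
    set2 (tbl m i S T) (i + 1) j (if b then 1 else 0) =
      tbl m i S (fun t => if t = j then b else T t) := by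
  have hne : ¬ (i + 1 = i) := by omega
  rw [set2, getD_tbl _ _ _ _ _ (by omega), if_neg hne, if_pos rfl, indRow_set _ _ hj,
    tbl_set_snd _ _ _ _ _ hi]

theorem tbl_shift (m i : Nat) (T : Nat → Bool) (hi : i < m) :
    tbl m i (fun _ => false) T = tbl m (i + 1) T (fun _ => false) := by
  apply List.ext_getElem (by simp [length_tbl])
  intro t ht h2
  have ht' : t < m + 1 := by simpa [length_tbl] using ht
  rw [getElem_tbl _ _ _ _ _ ht', getElem_tbl _ _ _ _ _ ht']
  by_cases h1 : t = i
  · rw [if_pos h1, if_neg (by omega), if_neg (by omega)]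
  · rw [if_neg h1]
    by_cases hx : t = i + 1
    · rw [if_pos hx, if_pos hx]
    · rw [if_neg hx, if_neg hx]
      by_cases hy : t = i + 1 + 1
      · rw [if_pos hy]
      · rw [if_neg hy]

theorem set2_tbl_snd_one (m i : Nat) (S T : Nat → Bool) (j : Nat) (hi : i < m) (hj : j < pyWidth) :
    set2 (tbl m i S T) (i + 1) j 1 = tbl m i S (fun t => if t = j then true else T t) := by
  simpa using set2_tbl_snd m i S T j hi hj true

theorem set2_tbl_fst_zero (m i : Nat) (S T : Nat → Bool) (j : Nat) (hi : i ≤ m) (hj : j < pyWidth) :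
    set2 (tbl m i S T) i j 0 = tbl m i (fun t => if t = j then false else S t) T := by
  simpa using set2_tbl_fst m i S T j hi hj false

theorem innerBody_tbl (a : List Int) (m i : Nat) (hi : i < m) (S : Nat → Bool) (d : Nat)
    (hd : a.getD i 0 = (d : Int)) (j : Nat) (hj : j < pyWidth) :
    innerBody a i (tbl m i (clearBelow S j) (partStep d S j)) j
      = tbl m i (clearBelow S (j + 1)) (partStep d S (j + 1)) := by
  have hread : get2 (tbl m i (clearBelow S j) (partStep d S j)) i j
      = if S j then 1 else 0 := by
    rw [get2_tbl_fst _ _ _ _ _ (by omega) hj]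
    simp [clearBelow]
  have hclear : ∀ k, k < pyWidth →
      (if k = j then false else clearBelow S j k) = clearBelow S (j + 1) k := by
    intro k hk
    by_cases hkj : k = j
    · simp [hkj, clearBelow, show ¬ (j + 1 ≤ j) from by omega]
    · simp only [if_neg hkj, clearBelow]
      cases hC : S k <;> simp <;> (first | omega | (rw [Bool.eq_iff_iff]; simp only [Bool.and_eq_true, Bool.or_eq_true, decide_eq_true_eq]; omega))
  by_cases hSj : S j = true
  · -- the cell is live: the guarded writes happen, then the cell is cleared
    rw [innerBody, hread, hSj, if_pos rfl]
    simp only [hd]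
    by_cases c1 : (j : Int) + d < (pyWidth : Int)
    · rw [if_pos c1]
      have e1 : ((j : Int) + d).toNat = j + d := by omega
      rw [e1, set2_tbl_snd_one _ _ _ _ _ hi (by omega)]
      by_cases c2 : (0 : Int) ≤ (j : Int) - d
      · rw [if_pos c2]
        have e2 : ((j : Int) - d).toNat = j - d := by omega
        rw [e2, set2_tbl_snd_one _ _ _ _ _ hi (by omega),
          set2_tbl_fst_zero _ _ _ _ _ (by omega) hj]
        apply tbl_congr hclear
        intro k hk; simp only [partStep]
        by_cases h1 : k = j - d
        · rw [if_pos h1, h1, show j - d + d = j from by omega]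
          simp [hSj, show j - d < pyWidth from by omega, show j < j + 1 from by omega]
        · rw [if_neg h1]
          by_cases h2 : k = j + d
          · rw [if_pos h2, h2, show j + d - d = j from by omega]
            simp [hSj, show j + d < pyWidth from by omega, show d ≤ j + d from by omega,
              show j < j + 1 from by omega]
          · rw [if_neg h2]
            cases hA : S (k - d) <;> cases hB : S (k + d) <;>
              simp <;> (first | omega | (rw [Bool.eq_iff_iff]; simp only [Bool.and_eq_true, Bool.or_eq_true, decide_eq_true_eq]; omega))
      · rw [if_neg c2, set2_tbl_fst_zero _ _ _ _ _ (by omega) hj]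
        apply tbl_congr hclear
        intro k hk; simp only [partStep]
        by_cases h2 : k = j + d
        · rw [if_pos h2, h2, show j + d - d = j from by omega]
          simp [hSj, show j + d < pyWidth from by omega, show d ≤ j + d from by omega,
            show j < j + 1 from by omega]
        · rw [if_neg h2]
          cases hA : S (k - d) <;> cases hB : S (k + d) <;>
            simp <;> (first | omega | (rw [Bool.eq_iff_iff]; simp only [Bool.and_eq_true, Bool.or_eq_true, decide_eq_true_eq]; omega))
    · rw [if_neg c1]
      by_cases c2 : (0 : Int) ≤ (j : Int) - d
      · rw [if_pos c2]
        have e2 : ((j : Int) - d).toNat = j - d := by omega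
        rw [e2, set2_tbl_snd_one _ _ _ _ _ hi (by omega),
          set2_tbl_fst_zero _ _ _ _ _ (by omega) hj]
        apply tbl_congr hclear
        intro k hk; simp only [partStep]
        by_cases h1 : k = j - d
        · rw [if_pos h1, h1, show j - d + d = j from by omega]
          simp [hSj, show j - d < pyWidth from by omega, show j < j + 1 from by omega]
        · rw [if_neg h1]
          cases hA : S (k - d) <;> cases hB : S (k + d) <;>
            simp <;> (first | omega | (rw [Bool.eq_iff_iff]; simp only [Bool.and_eq_true, Bool.or_eq_true, decide_eq_true_eq]; omega))
      · rw [if_neg c2, set2_tbl_fst_zero _ _ _ _ _ (by omega) hj]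
        apply tbl_congr hclear
        intro k hk; simp only [partStep]
        cases hA : S (k - d) <;> cases hB : S (k + d) <;>
          simp <;> (first | omega | (rw [Bool.eq_iff_iff]; simp only [Bool.and_eq_true, Bool.or_eq_true, decide_eq_true_eq]; omega))
  · -- dead cell: nothing happens
    have hSj' : S j = false := by revert hSj; cases S j <;> simp
    rw [innerBody, hread, hSj', if_neg (by decide)]
    apply tbl_congr
    · intro k hk
      have h := hclear k hk
      by_cases hkj : k = j
      · rw [← h, if_pos hkj, hkj]
        simp [clearBelow, hSj']
      · rw [← h, if_neg hkj]
    · intro k hk; simp only [partStep]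
      by_cases h1 : k - d = j
      · rw [h1]
        by_cases h2 : k + d = j
        · rw [h2]; simp [hSj']
        · cases hB : S (k + d) <;> simp [hSj'] <;> (first | omega | (rw [Bool.eq_iff_iff]; simp only [Bool.and_eq_true, Bool.or_eq_true, decide_eq_true_eq]; omega))
      · by_cases h2 : k + d = j
        · rw [h2]
          cases hA : S (k - d) <;> simp [hSj'] <;> (first | omega | (rw [Bool.eq_iff_iff]; simp only [Bool.and_eq_true, Bool.or_eq_true, decide_eq_true_eq]; omega))
        · cases hA : S (k - d) <;> cases hB : S (k + d) <;>
            simp <;> (first | omega | (rw [Bool.eq_iff_iff]; simp only [Bool.and_eq_true, Bool.or_eq_true, decide_eq_true_eq]; omega))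

theorem inner_fold (a : List Int) (m i : Nat) (hi : i < m) (S : Nat → Bool) (d : Nat)
    (hd : a.getD i 0 = (d : Int)) :
    ∀ n, n ≤ pyWidth →
      (List.range n).foldl (innerBody a i) (tbl m i (clearBelow S 0) (partStep d S 0))
        = tbl m i (clearBelow S n) (partStep d S n) := by
  intro n
  induction n with
  | zero => intro _; rfl
  | succ n ih =>
    intro hn
    rw [List.range_succ, List.foldl_append, ih (by omega), List.foldl_cons, List.foldl_nil,
      innerBody_tbl a m i hi S d hd n (by omega)]

theorem outerBody_tbl (a : List Int) (m i : Nat) (hi : i < m) (S : Nat → Bool)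
    (hS : vanishes S) (d : Nat) (hd : a.getD i 0 = (d : Int)) :
    outerBody a (tbl m i S (fun _ => false)) i = tbl m (i + 1) (stepS d S) (fun _ => false) := by
  have h0 : tbl m i S (fun _ => false) = tbl m i (clearBelow S 0) (partStep d S 0) := by
    apply tbl_congr
    · intro k hk; simp [clearBelow]
    · intro k hk; simp [partStep]
  rw [outerBody, h0, inner_fold a m i hi S d hd pyWidth le_rfl]
  have h1 : tbl m i (clearBelow S pyWidth) (partStep d S pyWidth)
      = tbl m i (fun _ => false) (stepS d S) := by
    apply tbl_congr
    · intro k hk; simp [clearBelow]; omega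
    · intro k hk; simp only [partStep, stepS]
      by_cases hkd : k + d < pyWidth
      · have e1 : decide (k + d < pyWidth) = true := by simp [hkd]
        have e2 : decide (k - d < pyWidth) = true := by simp; omega
        rw [e1, e2]; simp
      · have e1 : decide (k + d < pyWidth) = false := by simp [hkd]
        have e2 : decide (k - d < pyWidth) = true := by simp; omega
        rw [e1, e2, hS (k + d) (by omega)]; simp
  rw [h1, tbl_shift m i (stepS d S) hi]

theorem stepS_vanishes (d : Nat) (S : Nat → Bool) : vanishes (stepS d S) := by
  intro t ht; simp [stepS]; omega

theorem foldS_vanishes (a : List Int) (S : Nat → Bool) (hS : vanishes S) : vanishes (foldS a S) := by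
  induction a generalizing S with
  | nil => exact hS
  | cons x xs ih => exact ih _ (stepS_vanishes _ _)

theorem outer_fold (a : List Int) (ha : ∀ x ∈ a, 0 ≤ x) (S0 : Nat → Bool) (hS0 : vanishes S0) :
    ∀ k, k ≤ a.length →
      (List.range k).foldl (outerBody a) (tbl a.length 0 S0 (fun _ => false))
        = tbl a.length k (foldS (a.take k) S0) (fun _ => false) := by
  intro k
  induction k with
  | zero => intro _; rfl
  | succ k ih =>
    intro hk
    have hklen : k < a.length := by omega
    have hx : a.getD k 0 = a[k]'hklen := List.getD_eq_getElem a 0 hklen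
    have hxnn : 0 ≤ a[k]'hklen := ha _ (a.getElem_mem hklen)
    have hd : a.getD k 0 = (((a[k]'hklen).toNat : Nat) : Int) := by
      rw [hx]; omega
    rw [List.range_succ, List.foldl_append, ih (by omega), List.foldl_cons, List.foldl_nil,
      outerBody_tbl a a.length k hklen _ (foldS_vanishes _ _ hS0) (a[k]'hklen).toNat hd]
    congr 1
    rw [List.take_succ]
    simp only [foldS, List.foldl_append]
    rw [List.getElem?_eq_getElem hklen]
    rfl

theorem init_tbl (m g : Nat) (hg : g < pyWidth) :
    set2 (List.replicate (m + 1) (List.replicate pyWidth (0 : Int))) 0 g 1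
      = tbl m 0 (delta g) (fun _ => false) := by
  rw [set2]
  have hrow : (List.replicate (m + 1) (List.replicate pyWidth (0 : Int))).getD 0 []
      = List.replicate pyWidth (0 : Int) := by
    rw [List.getD_eq_getElem _ _ (by simp), List.getElem_replicate]
  rw [hrow]
  apply List.ext_getElem (by simp [length_tbl])
  intro t ht h2
  have ht' : t < m + 1 := by simpa using ht
  rw [List.getElem_set, getElem_tbl _ _ _ _ _ ht']
  by_cases h0 : 0 = t
  · rw [if_pos h0, if_pos h0.symm]
    apply List.ext_getElem (by simp [length_indRow])
    intro u hu h3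
    have hu' : u < pyWidth := by simpa using hu
    rw [List.getElem_set, getElem_indRow _ _ hu', List.getElem_replicate]
    by_cases hgu : g = u
    · rw [if_pos hgu, if_pos (by simp [delta, hgu])]
    · rw [if_neg hgu, if_neg (by simp [delta]; exact fun h => hgu h.symm)]
  · rw [if_neg h0, if_neg (fun h => h0 h.symm), show (if t = 0 + 1 then indRow (fun _ => false) else indRow (fun _ => false)) = indRow (fun _ => false) from by split <;> rfl]
    apply List.ext_getElem (by simp [length_indRow])
    intro u hu h3
    have hu' : u < pyWidth := by simpa using hu
    rw [getElem_indRow _ _ hu']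
    simp [List.getElem_replicate]

-- A computes the indicator of foldS a (delta start) at the target
theorem solve_eq_foldS (a : List Int) (doko geta : Int) (h : Pre_solve a doko geta) :
    solve a doko geta
      = if foldS a (delta (10000 + geta).toNat) (doko + 10000).toNat = true then 1 else 0 := by
  obtain ⟨ha, hg0, hg1, hd0, hd1⟩ := h
  have hgw : (10000 + geta).toNat < pyWidth := by omega
  have hk0w : (doko + 10000).toNat < pyWidth := by omega
  have hS0v : vanishes (delta (10000 + geta).toNat) := by
    intro t ht; simp [delta]; omega
  show get2 ((List.range a.length).foldl (outerBody a)
      (set2 (List.replicate (a.length + 1) (List.replicate pyWidth (0 : Int))) 0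
        (10000 + geta).toNat 1)) a.length (doko + 10000).toNat = _
  rw [init_tbl a.length _ hgw, outer_fold a ha _ hS0v a.length le_rfl, List.take_length,
    get2_tbl_final _ _ _ _ hk0w]

-- ---------- combinatorial core about foldS ----------

theorem delta_vanishes (j : Nat) (hj : j < pyWidth) : vanishes (delta j) := by
  intro t ht; simp [delta]; omega

theorem stepS_union (d : Nat) (S : Nat → Bool) (k : Nat) :
    stepS d S k = true ↔ ∃ j, S j = true ∧ stepS d (delta j) k = true := by
  simp only [stepS, delta, Bool.and_eq_true, Bool.or_eq_true, decide_eq_true_eq]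
  constructor
  · rintro ⟨hk, ⟨hd, hS⟩ | hS⟩
    · exact ⟨k - d, hS, hk, Or.inl ⟨hd, rfl⟩⟩
    · exact ⟨k + d, hS, hk, Or.inr rfl⟩
  · rintro ⟨j, hj, hk, ⟨hd, he⟩ | he⟩
    · exact ⟨hk, Or.inl ⟨hd, he ▸ hj⟩⟩
    · exact ⟨hk, Or.inr (he ▸ hj)⟩

theorem foldS_union (l : List Int) : ∀ (S : Nat → Bool) (k : Nat),
    foldS l S k = true ↔ ∃ j, S j = true ∧ foldS l (delta j) k = true := by
  induction l with
  | nil =>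
    intro S k
    constructor
    · intro h; exact ⟨k, h, by simp [foldS, delta]⟩
    · rintro ⟨j, hj, hk⟩
      have : k = j := by simpa [foldS, delta] using hk
      exact this ▸ hj
  | cons x l ih =>
    intro S k
    have e : ∀ (T : Nat → Bool), foldS (x :: l) T k = foldS l (stepS x.toNat T) k := fun _ => rfl
    rw [e, ih]
    constructor
    · rintro ⟨i, hi, hik⟩
      obtain ⟨j, hj, hji⟩ := (stepS_union _ _ _).1 hi
      exact ⟨j, hj, by rw [e, ih]; exact ⟨i, hji, hik⟩⟩
    · rintro ⟨j, hj, hjk⟩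
      rw [e, ih] at hjk
      obtain ⟨i, hji, hik⟩ := hjk
      exact ⟨i, (stepS_union _ _ _).2 ⟨j, hj, hji⟩, hik⟩

theorem foldS_delta_lt (l : List Int) (j k : Nat) (hj : j < pyWidth)
    (h : foldS l (delta j) k = true) : k < pyWidth := by
  by_contra hk
  rw [foldS_vanishes l (delta j) (delta_vanishes j hj) k (by omega)] at h
  exact absurd h (by simp)

theorem stepS_symm (d j k : Nat) (hj : j < pyWidth) (hk : k < pyWidth) :
    stepS d (delta j) k = true ↔ stepS d (delta k) j = true := by
  simp only [stepS, delta, Bool.and_eq_true, Bool.or_eq_true, decide_eq_true_eq]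
  omega

theorem foldS_append (u v : List Int) (S : Nat → Bool) :
    foldS (u ++ v) S = foldS v (foldS u S) := by
  simp [foldS, List.foldl_append]

theorem foldS_symm (l : List Int) : ∀ (j k : Nat), j < pyWidth → k < pyWidth →
    (foldS l (delta j) k = true ↔ foldS l.reverse (delta k) j = true) := by
  induction l with
  | nil =>
    intro j k hj hk
    simp only [List.reverse_nil]
    show delta j k = true ↔ delta k j = true
    simp [delta]; omega
  | cons x l ih =>
    intro j k hj hk
    have e1 : foldS (x :: l) (delta j) k = foldS l (stepS x.toNat (delta j)) k := rfl
    have e2 : foldS (x :: l).reverse (delta k) j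
        = stepS x.toNat (foldS l.reverse (delta k)) j := by
      rw [List.reverse_cons, foldS_append]
      rfl
    rw [e1, e2, foldS_union, stepS_union]
    constructor
    · rintro ⟨i, hi, hik⟩
      have hiW : i < pyWidth := by
        have := (stepS_union x.toNat (delta j) i).2 ⟨j, by simp [delta], hi⟩
        simp only [stepS, Bool.and_eq_true, decide_eq_true_eq] at this
        exact this.1
      exact ⟨i, (ih i k hiW hk).1 hik, (stepS_symm x.toNat j i hj hiW).1 hi⟩
    · rintro ⟨i, hi, hij⟩
      have hiW : i < pyWidth := foldS_delta_lt l.reverse k i hk hi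
      exact ⟨i, (stepS_symm x.toNat i j hiW hj).1 hij, (ih i k hiW hk).2 hi⟩

-- split at h, flip the suffix: meet-in-the-middle is exactly full forward reachability
theorem foldS_meet (a : List Int) (h s t : Nat) (hh : h ≤ a.length)
    (hs : s < pyWidth) (ht : t < pyWidth) :
    ((∃ n, foldS (a.take h) (delta s) n = true ∧ foldS ((a.drop h).reverse) (delta t) n = true)
      ↔ foldS a (delta s) t = true) := by
  have hsplit : foldS a (delta s) t = foldS (a.drop h) (foldS (a.take h) (delta s)) t := by
    rw [← foldS_append, List.take_append_drop]
  constructor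
  · rintro ⟨n, h1, h2⟩
    have hnW : n < pyWidth := foldS_delta_lt (a.take h) s n hs h1
    rw [hsplit, foldS_union]
    exact ⟨n, h1, (foldS_symm (a.drop h) n t hnW ht).2 h2⟩
  · intro hf
    rw [hsplit, foldS_union] at hf
    obtain ⟨n, h1, h2⟩ := hf
    have hnW : n < pyWidth := foldS_delta_lt (a.take h) s n hs h1
    exact ⟨n, h1, (foldS_symm (a.drop h) n t hnW ht).1 h2⟩

-- ---------- B side: the frontier sets compute foldS ----------

theorem mem_reachAdd (x : Int) (nxt : List Int) (j k : Int) :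
    k ∈ reachAdd x nxt j ↔ k ∈ nxt ∨ (k = j + x ∧ j + x < (pyWidth : Int))
      ∨ (k = j - x ∧ 0 ≤ j - x) := by
  simp only [reachAdd]
  split_ifs with h1 h2 h3 <;> simp only [PySem.Set.mem_add, Int.sub_nonneg] at * <;> tauto

theorem mem_foldl_reachAdd (x : Int) (L : List Int) : ∀ (s0 : List Int) (k : Int),
    k ∈ L.foldl (reachAdd x) s0 ↔ k ∈ s0 ∨ ∃ j ∈ L,
      (k = j + x ∧ j + x < (pyWidth : Int)) ∨ (k = j - x ∧ 0 ≤ j - x) := by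
  induction L with
  | nil => intro s0 k; simp
  | cons y L ih =>
    intro s0 k
    rw [List.foldl_cons, ih, mem_reachAdd]
    simp only [List.mem_cons]
    constructor
    · rintro ((h | h) | ⟨j, hj, hc⟩)
      · exact Or.inl h
      · exact Or.inr ⟨y, Or.inl rfl, h⟩
      · exact Or.inr ⟨j, Or.inr hj, hc⟩
    · rintro (h | ⟨j, hj | hj, hc⟩)
      · exact Or.inl (Or.inl h)
      · exact Or.inl (Or.inr (hj ▸ hc))
      · exact Or.inr ⟨j, hj, hc⟩

theorem reachStep_inv (x : Int) (hx : 0 ≤ x) (L : List Int) (S : Nat → Bool)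
    (hS : vanishes S) (hL : ∀ j : Int, j ∈ L ↔ (0 ≤ j ∧ S j.toNat = true)) (k : Int) :
    k ∈ reachStep x L ↔ (0 ≤ k ∧ stepS x.toNat S k.toNat = true) := by
  rw [reachStep, mem_foldl_reachAdd]
  have hempty : ¬ (k ∈ (PySem.Set.empty : List Int)) := by simp [PySem.Set.empty]
  simp only [hempty, false_or]
  constructor
  · rintro ⟨j, hjL, hc⟩
    obtain ⟨hj0, hjS⟩ := (hL j).1 hjL
    have hjW : j.toNat < pyWidth := by
      by_contra h'
      rw [hS j.toNat (by omega)] at hjS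
      exact absurd hjS (by simp)
    simp only [stepS, Bool.and_eq_true, Bool.or_eq_true, decide_eq_true_eq]
    rcases hc with ⟨hk, hlt⟩ | ⟨hk, hge⟩
    · refine ⟨by omega, by omega, Or.inl ⟨by omega, ?_⟩⟩
      rw [show k.toNat - x.toNat = j.toNat from by omega]; exact hjS
    · refine ⟨by omega, by omega, Or.inr ?_⟩
      rw [show k.toNat + x.toNat = j.toNat from by omega]; exact hjS
  · rintro ⟨hk0, hstep⟩
    simp only [stepS, Bool.and_eq_true, Bool.or_eq_true, decide_eq_true_eq] at hstep
    obtain ⟨hkW, hd⟩ := hstep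
    rcases hd with ⟨hdk, hS'⟩ | hS'
    · refine ⟨k - x, (hL _).2 ⟨by omega, ?_⟩, Or.inl ⟨by omega, by omega⟩⟩
      rw [show (k - x).toNat = k.toNat - x.toNat from by omega]; exact hS'
    · refine ⟨k + x, (hL _).2 ⟨by omega, ?_⟩, Or.inr ⟨by omega, by omega⟩⟩
      rw [show (k + x).toNat = k.toNat + x.toNat from by omega]; exact hS'

theorem reachB_inv (items : List Int) : ∀ (L : List Int) (S : Nat → Bool),
    (∀ x ∈ items, 0 ≤ x) → vanishes S →
    (∀ j : Int, j ∈ L ↔ (0 ≤ j ∧ S j.toNat = true)) →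
    ∀ j : Int, j ∈ reachB items L ↔ (0 ≤ j ∧ foldS items S j.toNat = true) := by
  induction items with
  | nil => intro L S _ _ hL j; exact hL j
  | cons x items ih =>
    intro L S hx hS hL j
    have hx0 : 0 ≤ x := hx x (List.mem_cons_self ..)
    have e : reachB (x :: items) L = reachB items (reachStep x L) := rfl
    rw [e]
    exact ih (reachStep x L) (stepS x.toNat S)
      (fun y hy => hx y (List.mem_cons_of_mem _ hy))
      (stepS_vanishes _ _)
      (reachStep_inv x hx0 L S hS hL) j

theorem singleton_inv (v : Int) (hv0 : 0 ≤ v) (hvW : v < (pyWidth : Int)) :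
    ∀ j : Int, j ∈ PySem.Set.ofList [v] ↔ (0 ≤ j ∧ delta v.toNat j.toNat = true) := by
  intro j
  rw [PySem.Set.mem_ofList]
  simp only [List.mem_singleton, delta, decide_eq_true_eq]
  omega

-- B computes the same indicator
theorem solve_alt_eq_foldS (a : List Int) (doko geta : Int) (h : Pre_solve a doko geta) :
    solve_alt a doko geta
      = if foldS a (delta (10000 + geta).toNat) (doko + 10000).toNat = true then 1 else 0 := by
  obtain ⟨ha, hg0, hg1, hd0, hd1⟩ := h
  have hsW : (10000 + geta).toNat < pyWidth := by omega
  have htW : (doko + 10000).toNat < pyWidth := by omega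
  have hf := reachB_inv (a.take (a.length / 2)) (PySem.Set.ofList [10000 + geta])
    (delta (10000 + geta).toNat)
    (fun x hx => ha x (List.mem_of_mem_take hx))
    (delta_vanishes _ hsW)
    (singleton_inv _ hg0 hg1)
  have hb := reachB_inv ((a.drop (a.length / 2)).reverse) (PySem.Set.ofList [doko + 10000])
    (delta (doko + 10000).toNat)
    (fun x hx => ha x (List.mem_of_mem_drop (List.mem_reverse.1 hx)))
    (delta_vanishes _ htW)
    (singleton_inv _ hd0 hd1)
  show (if PySem.Set.inter
        (reachB (a.take (a.length / 2)) (PySem.Set.ofList [10000 + geta]))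
        (reachB ((a.drop (a.length / 2)).reverse) (PySem.Set.ofList [doko + 10000])) ≠ []
      then (1 : Int) else 0) = _
  have hiff : (PySem.Set.inter
        (reachB (a.take (a.length / 2)) (PySem.Set.ofList [10000 + geta]))
        (reachB ((a.drop (a.length / 2)).reverse) (PySem.Set.ofList [doko + 10000])) ≠ [])
      ↔ foldS a (delta (10000 + geta).toNat) (doko + 10000).toNat = true := by
    rw [← List.isEmpty_eq_false_iff, List.isEmpty_eq_false_iff_exists_mem]
    constructor
    · rintro ⟨j, hj⟩
      rw [PySem.Set.mem_inter] at hj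
      obtain ⟨hj1, hj2⟩ := hj
      obtain ⟨hj0, hF⟩ := (hf j).1 hj1
      obtain ⟨_, hG⟩ := (hb j).1 hj2
      exact (foldS_meet a (a.length / 2) _ _ (by omega) hsW htW).1 ⟨j.toNat, hF, hG⟩
    · intro hff
      obtain ⟨n, hF, hG⟩ := (foldS_meet a (a.length / 2) _ _ (by omega) hsW htW).2 hff
      refine ⟨(n : Int), ?_⟩
      rw [PySem.Set.mem_inter]
      exact ⟨(hf _).2 ⟨by omega, by simpa using hF⟩, (hb _).2 ⟨by omega, by simpa using hG⟩⟩
  by_cases hc : foldS a (delta (10000 + geta).toNat) (doko + 10000).toNat = true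
  · rw [if_pos (hiff.2 hc), if_pos hc]
  · rw [if_neg (fun hne => hc (hiff.1 hne)), if_neg hc]

-- ===== VERDICT (by name: the statement is the Claim_ definition above) =====
theorem solve_spec : Claim_equal_solve := by
  intro a doko geta _ hpre
  unfold Spec_solve
  rw [solve_eq_foldS a doko geta hpre, solve_alt_eq_foldS a doko geta hpre]
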